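-- pv_equiv track=rewrite | github.com/owais-ch/Arrays | delete_smaller.py | deleteElement
-- ===== SOURCE A (Python) =====
-- def deleteElement (arr, n, k) :
--     p=0
--     i=1
--     while p<k and i<n:
--         if arr[i-1]<arr[i]:
--             arr.pop(i-1)
--             n-=1
--             p+=1
--             i=i-1
--         else:
--             i+=1
--         if i==0:
--             i=1
--         if p==k:
--             break
--
--     return arr
-- ===== SOURCE B (Python) =====
-- def deleteElement(arr, n, k):
--     limit = n if n > 0 else 0
--     stack = []
--     removed = 0
--     for x in arr[:limit]:
--         while stack and removed < k and stack[-1] < x: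
--             stack.pop()
--             removed += 1
--         stack.append(x)
--     return stack + arr[limit:]
-- ===== Notes on version B (the rewrite author's own statement) =====
-- stated objective: faster
-- what changed: Replaces A's in-place pop-and-step-back while loop (each pop shifts the list and re-walks) by a single left-to-right pass with a monotonic stack that builds a new list, O(n) instead of O(n*k) list-shifting.
-- outside the precondition, e.g. on deleteElement([1, 2], 5, 1): A returns [2], B returns [2]
import Mathlib
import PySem

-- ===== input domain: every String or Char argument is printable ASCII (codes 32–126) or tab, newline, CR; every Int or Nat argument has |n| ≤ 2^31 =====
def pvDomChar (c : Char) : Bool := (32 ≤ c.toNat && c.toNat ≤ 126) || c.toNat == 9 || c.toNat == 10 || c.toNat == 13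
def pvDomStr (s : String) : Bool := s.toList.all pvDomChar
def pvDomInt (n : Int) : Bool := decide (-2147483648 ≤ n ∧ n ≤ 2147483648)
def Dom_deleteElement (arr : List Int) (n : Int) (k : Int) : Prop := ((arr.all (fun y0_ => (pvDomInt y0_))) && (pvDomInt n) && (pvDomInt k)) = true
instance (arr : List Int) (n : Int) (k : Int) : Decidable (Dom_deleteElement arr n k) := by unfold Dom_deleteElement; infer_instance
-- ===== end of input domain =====

-- B replaces A's in-place pop-and-step-back while loop by a single-pass monotonic
-- stack building a new list (objective: faster). A mutates `arr` in place; B does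
-- not — the equivalence proved here is about the RETURN value only.

-- ===== PORT A =====
-- Literal port of A's while loop. State (arr, n, p, i) as in the Python; an
-- out-of-range access (Python IndexError, excluded by Pre_) makes pyGet?/pop?
-- return none and the loop returns the current arr there.
def deleteElementLoop (arr : List Int) (n : Int) (p : Int) (i : Int) (k : Int) : List Int :=
  if h : p < k ∧ i < n then
    match PySem.List.pyGet? arr (i - 1), PySem.List.pyGet? arr i with
    | some a, some b =>
      if a < b then
        match PySem.List.pop? arr (i - 1) with
        | some (_, arr') =>
          let n' := n - 1
          let p' := p + 1
          let i0 := i - 1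
          let i' := if i0 = 0 then 1 else i0
          if p' = k then arr' else deleteElementLoop arr' n' p' i' k
        | none => arr
      else
        let i0 := i + 1
        let i' := if i0 = 0 then 1 else i0
        if p = k then arr else deleteElementLoop arr n p i' k
    | _, _ => arr
  else arr
termination_by ((k - p) + (n - i)).toNat
decreasing_by
  · split_ifs <;> omega
  · split_ifs <;> omega

def deleteElement (arr : List Int) (n : Int) (k : Int) : List Int :=
  deleteElementLoop arr n 0 1 k

-- ===== PORT B =====
-- Source B's inner `while stack and removed < k and stack[-1] < x: stack.pop()`;
-- the stack is kept top-first (cons = append at Python's end).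
def altPop (stack : List Int) (removed : Int) (k : Int) (x : Int) : List Int × Int :=
  match stack with
  | [] => ([], removed)
  | t :: rest =>
    if removed < k ∧ t < x then altPop rest (removed + 1) k x else (t :: rest, removed)

-- Source B's `for x in arr[:limit]` loop.
def altLoop (xs : List Int) (stack : List Int) (removed : Int) (k : Int) : List Int :=
  match xs with
  | [] => stack.reverse
  | x :: xs' =>
    let sr := altPop stack removed k x
    altLoop xs' (x :: sr.1) sr.2 k

def deleteElement_alt (arr : List Int) (n : Int) (k : Int) : List Int :=
  let limit := if 0 < n then n else 0
  altLoop (arr.take limit.toNat) [] 0 k ++ arr.drop limit.toNat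

-- ===== PRECONDITION & SPEC =====
-- Pre_ excludes n > len(arr) with a positive pop budget k: there A's index
-- arithmetic can run past the end of the list and raise IndexError (on some such
-- inputs A still returns, namely when the budget is exhausted first — and then
-- with the same value as B).
def Pre_deleteElement (arr : List Int) (n : Int) (k : Int) : Prop :=
  n ≤ (arr.length : Int) ∨ k ≤ 0
instance (arr : List Int) (n : Int) (k : Int) : Decidable (Pre_deleteElement arr n k) := by
  unfold Pre_deleteElement; infer_instance

def pvWitness_deleteElement : List Int × Int × Int := ([3, 1, 2], 3, 1)

def Spec_deleteElement (arr : List Int) (n : Int) (k : Int) (out : List Int) : Prop :=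
  out = deleteElement_alt arr n k
instance (arr : List Int) (n : Int) (k : Int) (out : List Int) : Decidable (Spec_deleteElement arr n k out) := by
  unfold Spec_deleteElement; infer_instance

-- ===== CLAIM (what is proved, stated in full; the proofs are below) =====
def Claim_equal_deleteElement : Prop := ∀ (arr : List Int) (n : Int) (k : Int), Dom_deleteElement arr n k → Pre_deleteElement arr n k → Spec_deleteElement arr n k (deleteElement arr n k)

-- ===== LEMMAS AND PROOFS =====

lemma altPop_ge (s : List Int) (r k x : Int) (h : k ≤ r) : altPop s r k x = (s, r) := by
  cases s with
  | nil => rfl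
  | cons t rest => simp only [altPop]; rw [if_neg]; omega

lemma altLoop_ge (xs : List Int) (s : List Int) (r k : Int) (h : k ≤ r) :
    altLoop xs s r k = s.reverse ++ xs := by
  induction xs generalizing s with
  | nil => simp [altLoop]
  | cons x xs ih => simp [altLoop, altPop_ge _ _ _ _ h, ih]

-- one pop of B's inner while, seen at the outer-loop level
lemma altLoop_pop (b : Int) (rest s1 : List Int) (a p k : Int) (hpk : p < k) (hab : a < b) :
    altLoop (b :: rest) (a :: s1) p k = altLoop (b :: rest) s1 (p + 1) k := by
  simp only [altLoop, altPop, if_pos (And.intro hpk hab)]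

lemma altLoop_nil_step (x : Int) (xs : List Int) (r k : Int) :
    altLoop (x :: xs) [] r k = altLoop xs [x] r k := by
  simp [altLoop, altPop]

-- The loop invariant: A's state (arr, n, p, i) corresponds to B's fold with the
-- first i elements of arr as the (reversed) stack and p removals already spent.
lemma loop_eq (m : Nat) : ∀ (arr : List Int) (n p i k : Int),
    ((k - p) + (n - i)).toNat ≤ m → 1 ≤ i → i ≤ n → n ≤ (arr.length : Int) →
    deleteElementLoop arr n p i k =
      altLoop ((arr.drop i.toNat).take (n - i).toNat) ((arr.take i.toNat).reverse) p k
        ++ arr.drop n.toNat := by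
  induction m using Nat.strong_induction_on with
  | _ m ih =>
    intro arr n p i k hm hi1 hin hn
    rw [deleteElementLoop]
    by_cases hc : p < k ∧ i < n
    case neg =>
      rw [dif_neg hc]
      by_cases hik : i < n
      · -- p ≥ k: B spends no more pops, altLoop only re-appends
        have hpk : k ≤ p := by omega
        rw [altLoop_ge _ _ _ _ hpk, List.reverse_reverse]
        have h1 : (arr.drop i.toNat).take (n - i).toNat ++ arr.drop n.toNat = arr.drop i.toNat := by
          have h2 : arr.drop n.toNat = (arr.drop i.toNat).drop (n - i).toNat := by
            rw [List.drop_drop]; congr 1; omega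
          rw [h2, List.take_append_drop]
        rw [List.append_assoc, h1, List.take_append_drop]
      · -- i = n: nothing left to process
        have hie : i = n := by omega
        subst hie
        simp [altLoop, List.take_append_drop]
    case pos =>
      obtain ⟨hpk, hin'⟩ := hc
      rw [dif_pos ⟨hpk, hin'⟩]
      have hlen : i.toNat < arr.length := by omega
      have hlen1 : (i - 1).toNat < arr.length := by omega
      have e1 : PySem.List.pyGet? arr (i - 1) = some arr[(i - 1).toNat] :=
        PySem.List.pyGet?_eq_some_getElem arr (i := i - 1) (by omega) (by omega)
      have e2 : PySem.List.pyGet? arr i = some arr[i.toNat] :=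
        PySem.List.pyGet?_eq_some_getElem arr (i := i) (by omega) (by omega)
      -- xs = arr[i] :: rest,  stack = arr[i-1] :: s1
      have hxs : (arr.drop i.toNat).take (n - i).toNat
          = arr[i.toNat] :: (arr.drop (i.toNat + 1)).take ((n - i).toNat - 1) := by
        rw [List.drop_eq_getElem_cons hlen]
        have h3 : (n - i).toNat = ((n - i).toNat - 1) + 1 := by omega
        rw [h3, List.take_succ_cons]
        norm_num
      have hst : (arr.take i.toNat).reverse
          = arr[(i - 1).toNat] :: (arr.take (i - 1).toNat).reverse := by
        have h1 : i.toNat = (i - 1).toNat + 1 := by omega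
        rw [h1, List.take_succ, List.getElem?_eq_getElem hlen1]
        simp
      simp only [e1, e2]
      by_cases hab : arr[(i - 1).toNat] < arr[i.toNat]
      · rw [if_pos hab]
        set j := (i - 1).toNat with hj
        have hlenJ : j < arr.length := hlen1
        have hpop : PySem.List.pop? arr (i - 1) = some (arr[j], arr.eraseIdx j) := by
          rw [show i - 1 = ((j : Nat) : Int) by omega]
          exact PySem.List.pop?_natCast arr j hlenJ
        simp only [hpop]
        have hsplit : arr.eraseIdx j = arr.take j ++ arr.drop (j + 1) :=
          List.eraseIdx_eq_take_drop_succ ..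
        have hlenj : (arr.take j).length = j := by rw [List.length_take]; omega
        have hlen' : ((arr.eraseIdx j).length : Int) = (arr.length : Int) - 1 := by
          rw [List.length_eraseIdx_of_lt hlenJ]; omega
        have hdrop' : ∀ t : Nat, j ≤ t → (arr.eraseIdx j).drop t = arr.drop (t + 1) := by
          intro t ht
          rw [hsplit, List.drop_append, hlenj, List.drop_eq_nil_of_le (by omega), List.nil_append,
            List.drop_drop]
          congr 1; omega
        have htake' : (arr.eraseIdx j).take j = arr.take j := by
          rw [hsplit, List.take_append, hlenj]
          simp [List.take_take]
        have hdropn : (arr.eraseIdx j).drop (n - 1).toNat = arr.drop n.toNat := by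
          rw [hdrop' (n - 1).toNat (by omega)]; congr 1; omega
        -- the value after the `break` is the value the loop head returns anyway
        have hL : (if p + 1 = k then arr.eraseIdx j
              else deleteElementLoop (arr.eraseIdx j) (n - 1) (p + 1) (if i - 1 = 0 then 1 else i - 1) k)
            = deleteElementLoop (arr.eraseIdx j) (n - 1) (p + 1) (if i - 1 = 0 then 1 else i - 1) k := by
          by_cases hb : p + 1 = k
          · rw [if_pos hb, deleteElementLoop, dif_neg (by omega)]
          · rw [if_neg hb]
        -- A's state after the pop corresponds to B with the popped stack and p+1
        have hmain : deleteElementLoop (arr.eraseIdx j) (n - 1) (p + 1) (if i - 1 = 0 then 1 else i - 1) k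
            = altLoop ((arr.drop i.toNat).take (n - i).toNat) ((arr.take j).reverse)
                (p + 1) k ++ arr.drop n.toNat := by
          by_cases hione : i = 1
          · subst hione
            rw [if_pos (by norm_num)]
            have hj0 : j = 0 := by omega
            have hrw := ih (((k - (p+1)) + ((n-1) - 1)).toNat) (by omega) (arr.eraseIdx j) (n - 1)
              (p + 1) 1 k le_rfl (by omega) (by omega) (by omega)
            rw [hrw, hdropn, hj0]
            congr 1
            cases arr with
            | nil => simp at hlen
            | cons a tl =>
              rw [List.eraseIdx_cons_zero]
              cases tl with
              | nil => simp at hn; omega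
              | cons b tl2 =>
                have h7 : (n - 1).toNat = ((n - 1).toNat - 1) + 1 := by omega
                simp only [Int.toNat_one, List.take_succ_cons, List.take_zero,
                  List.drop_succ_cons, List.drop_zero, List.reverse_cons, List.reverse_nil,
                  List.nil_append]
                rw [h7, List.take_succ_cons, altLoop_nil_step]
                congr 2
                omega
          · rw [if_neg (by omega : ¬ (i - 1 = 0))]
            have hrw := ih (((k - (p+1)) + ((n-1) - (i-1))).toNat) (by omega) (arr.eraseIdx j)
              (n - 1) (p + 1) (i - 1) k le_rfl (by omega) (by omega) (by omega)
            rw [hrw, hdropn]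
            congr 2
            · rw [show (i - 1).toNat = j from rfl, hdrop' j (le_refl j),
                show j + 1 = i.toNat by omega]
              congr 1; omega
            · rw [show (i - 1).toNat = j from rfl, htake']
        rw [hL, hmain, hxs, hst]
        rw [show (arr.take (i - 1).toNat) = arr.take j from rfl]
        rw [altLoop_pop arr[i.toNat] _ _ _ p k hpk hab]
      · rw [if_neg hab]
        have hne : ¬ (i + 1 = 0) := by omega
        have hne2 : ¬ (p = k) := by omega
        simp only [hne, if_false, if_neg hne2]
        have hrw := ih (((k - p) + (n - (i+1))).toNat) (by omega) arr n p (i + 1) k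
          le_rfl (by omega) (by omega) hn
        rw [hrw]
        congr 1
        have h4 : (i + 1).toNat = i.toNat + 1 := by omega
        have h5 : (n - (i+1)).toNat = (n - i).toNat - 1 := by omega
        have h6 : (arr.take (i.toNat + 1)).reverse = arr[i.toNat] :: (arr.take i.toNat).reverse := by
          rw [List.take_succ, List.getElem?_eq_getElem hlen]; simp
        rw [h4, h5, h6, hxs, hst]
        simp only [altLoop, altPop,
          if_neg (show ¬ (p < k ∧ arr[(i-1).toNat] < arr[i.toNat]) by tauto)]

-- ===== VERDICT (by name: the statement is the Claim_ definition above) =====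
theorem deleteElement_spec : Claim_equal_deleteElement := by
  intro arr n k _ hpre
  unfold Pre_deleteElement at hpre
  unfold Spec_deleteElement deleteElement deleteElement_alt
  by_cases hn : n ≤ (arr.length : Int)
  · by_cases h1 : 0 < n
    · rw [loop_eq (((k - 0) + (n - 1)).toNat) arr n 0 1 k le_rfl (by omega) (by omega) hn]
      simp only [if_pos h1]
      congr 1
      cases arr with
      | nil => simp at hn; omega
      | cons a tl =>
        have h2 : n.toNat = (n.toNat - 1) + 1 := by omega
        rw [h2, List.take_succ_cons, altLoop_nil_step]
        simp only [Int.toNat_one, List.take_succ_cons, List.take_zero, List.drop_succ_cons,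
          List.drop_zero, List.reverse_cons, List.reverse_nil, List.nil_append]
        congr 2
        omega
    · rw [deleteElementLoop, dif_neg (by omega : ¬ ((0:Int) < k ∧ 1 < n))]
      rw [if_neg h1]
      show arr = altLoop (arr.take (0:Int).toNat) [] 0 k ++ arr.drop (0:Int).toNat
      simp [altLoop]
  · -- n > len(arr): Pre_ then says k ≤ 0, and both sides leave arr unchanged
    have hk : k ≤ 0 := by tauto
    rw [deleteElementLoop, dif_neg (by omega : ¬ ((0:Int) < k ∧ 1 < n))]
    simp only [altLoop_ge _ _ _ _ (by omega : k ≤ (0:Int)), List.reverse_nil, List.nil_append,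
      List.take_append_drop]
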